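-- pv_equiv track=rewrite | github.com/ncbi-nlp/VarTriage | get_pubmed_info.py | url_generation
-- ===== SOURCE A (Python) =====
-- def url_generation(pmids, max_pmids):
--     urls = []
--
--     pmids_used_counter = 0
--     while pmids_used_counter<len(pmids) :
--         temp_query = ''
--         temp_query_counter=0
--         while ((temp_query_counter<max_pmids)&(pmids_used_counter<len(pmids))) :
--             if (pmids_used_counter%max_pmids)==0 :
--                 temp_query=pmids[pmids_used_counter]
--             else :
--                 temp_query = temp_query + '+' + pmids[pmids_used_counter]
--             pmids_used_counter=pmids_used_counter+1
--             temp_query_counter=temp_query_counter+1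
--         base_url_temp = "https://eutils.ncbi.nlm.nih.gov/entrez/eutils/efetch.fcgi?db=pubmed&id=" + temp_query + "&retmode=xml"
--         urls.append(base_url_temp)
--     return urls
-- ===== SOURCE B (Python) =====
-- def url_generation(pmids, max_pmids):
--     urls = []
--     for i in range(0, len(pmids), max_pmids):
--         query = '+'.join(pmids[i:i + max_pmids])
--         urls.append("https://eutils.ncbi.nlm.nih.gov/entrez/eutils/efetch.fcgi?db=pubmed&id="
--                     + query + "&retmode=xml")
--     return urls
-- ===== Notes on version B (the rewrite author's own statement) =====
-- stated objective: faster
-- what changed: Replaced A's nested counter-driven while loops with modulo-gated repeated '+'-string-concatenation by a single stepped-range loop over chunk start indices using slicing and '+'.join.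
-- outside the precondition, e.g. on url_generation([], 0): A returns [], B raises ValueError
import Mathlib
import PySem

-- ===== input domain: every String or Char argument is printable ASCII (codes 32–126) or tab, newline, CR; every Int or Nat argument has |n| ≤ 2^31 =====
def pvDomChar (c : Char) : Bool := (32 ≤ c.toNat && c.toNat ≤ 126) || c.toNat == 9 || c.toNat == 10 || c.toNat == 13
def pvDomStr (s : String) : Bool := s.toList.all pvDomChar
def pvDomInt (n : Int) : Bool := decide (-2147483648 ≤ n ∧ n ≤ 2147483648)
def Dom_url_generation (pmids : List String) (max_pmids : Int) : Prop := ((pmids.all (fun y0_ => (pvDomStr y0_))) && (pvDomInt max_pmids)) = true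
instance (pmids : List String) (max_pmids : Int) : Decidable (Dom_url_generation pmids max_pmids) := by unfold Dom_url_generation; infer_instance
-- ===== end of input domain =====

-- B replaces A's nested counter-driven while loops (modulo-gated manual '+'-concatenation)
-- with an idiomatic stepped-range loop over chunk starts using slicing and '+'.join.

-- ===== PORT A =====
def pvBase : String := "https://eutils.ncbi.nlm.nih.gov/entrez/eutils/efetch.fcgi?db=pubmed&id="

-- inner while loop of A; state (temp_query, temp_query_counter, pmids_used_counter);
-- fuel-driven (A diverges for max_pmids ≤ 0 with non-empty pmids, which Pre_ excludes).
-- pyGetD with default "" is exact here: the loop guard guarantees the index is in range.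
def pvInnerA (pmids : List String) (max_pmids : Int) :
    Nat → String → Int → Int → String × Int
  | 0, tq, _, puc => (tq, puc)
  | fuel+1, tq, tqc, puc =>
    if tqc < max_pmids ∧ puc < (pmids.length : Int) then
      let tq' := if PySem.Int.mod puc max_pmids = 0
                 then PySem.List.pyGetD pmids puc ""
                 else tq ++ "+" ++ PySem.List.pyGetD pmids puc ""
      pvInnerA pmids max_pmids fuel tq' (tqc + 1) (puc + 1)
    else (tq, puc)

-- outer while loop of A
def pvOuterA (pmids : List String) (max_pmids : Int) :
    Nat → Int → List String → List String
  | 0, _, urls => urls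
  | fuel+1, puc, urls =>
    if puc < (pmids.length : Int) then
      let r := pvInnerA pmids max_pmids pmids.length "" 0 puc
      pvOuterA pmids max_pmids fuel r.2 (urls ++ [pvBase ++ r.1 ++ "&retmode=xml"])
    else urls

def url_generation (pmids : List String) (max_pmids : Int) : List String :=
  pvOuterA pmids max_pmids pmids.length 0 []

-- ===== PORT B =====
def url_generation_alt (pmids : List String) (max_pmids : Int) : List String :=
  (PySem.List.pyRange 0 (pmids.length : Int) max_pmids).foldl
    (fun urls i =>
      let query := PySem.Str.join "+" (PySem.List.slice pmids (some i) (some (i + max_pmids)))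
      urls ++ [pvBase ++ query ++ "&retmode=xml"]) []

-- ===== PRECONDITION & SPEC =====
-- Pre_ excludes non-positive max_pmids: there A infinite-loops whenever pmids is non-empty,
-- and on the single returning corner (pmids = [], max_pmids = 0, where A returns []) B's
-- range(0, 0, 0) raises ValueError; empty pmids with non-zero max_pmids stays admitted.
def Pre_url_generation (pmids : List String) (max_pmids : Int) : Prop :=
  1 ≤ max_pmids ∨ (pmids = [] ∧ max_pmids ≠ 0)
instance (pmids : List String) (max_pmids : Int) : Decidable (Pre_url_generation pmids max_pmids) := by
  unfold Pre_url_generation; infer_instance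

def pvWitness_url_generation : List String × Int := (["12345", "678", "90"], 2)

def Spec_url_generation (pmids : List String) (max_pmids : Int) (out : List String) : Prop :=
  out = url_generation_alt pmids max_pmids
instance (pmids : List String) (max_pmids : Int) (out : List String) : Decidable (Spec_url_generation pmids max_pmids out) := by
  unfold Spec_url_generation; infer_instance

-- ===== CLAIM (what is proved, stated in full; the proofs are below) =====
def Claim_equal_url_generation : Prop :=
  ∀ (pmids : List String) (max_pmids : Int), Dom_url_generation pmids max_pmids →
    Pre_url_generation pmids max_pmids →
    Spec_url_generation pmids max_pmids (url_generation pmids max_pmids)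

-- ===== LEMMAS AND PROOFS =====

-- Python '%' is Lean's emod for a positive divisor
theorem pv_mod_pos (a m : Int) (hm : 0 < m) : PySem.Int.mod a m = a % m := by
  show a.fmod m = a % m
  rw [Int.fmod_eq_emod]
  simp [Or.inl hm.le]

theorem pvRange_nil {a b s : Int} (hs : 0 < s) (hba : b ≤ a) :
    PySem.List.pyRange a b s = [] := by
  rw [PySem.List.pyRange_of_pos _ _ hs]
  simp [Int.not_lt.mpr hba]

theorem pvRange_cons {a b s : Int} (hs : 0 < s) (hab : a < b) :
    PySem.List.pyRange a b s = a :: PySem.List.pyRange (a + s) b s := by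
  rw [PySem.List.pyRange_of_pos _ _ hs, PySem.List.pyRange_of_pos _ _ hs]
  have hcount : (if a < b then ((b - a + s - 1) / s).toNat else 0)
      = (if a + s < b then ((b - (a + s) + s - 1) / s).toNat else 0) + 1 := by
    rw [if_pos hab]
    by_cases h2 : a + s < b
    · rw [if_pos h2]
      have he : b - a + s - 1 = (b - (a + s) + s - 1) + 1 * s := by ring
      rw [he, Int.add_mul_ediv_right _ _ hs.ne']
      have h0 : 0 ≤ (b - (a + s) + s - 1) / s := by
        apply Int.ediv_nonneg _ hs.le
        omega
      omega
    · rw [if_neg h2]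
      have he : b - a + s - 1 = (b - a - 1) + 1 * s := by ring
      rw [he, Int.add_mul_ediv_right _ _ hs.ne']
      have h0 : (b - a - 1) / s = 0 := Int.ediv_eq_zero_of_lt (by omega) (by omega)
      omega
  rw [hcount, List.range_succ_eq_map]
  simp only [List.map_cons, List.map_map]
  congr 1
  · simp
  · apply List.map_congr_left
    intro k _
    simp [Function.comp, Nat.succ_eq_add_one]
    ring

-- slice xs[i : i+c] decomposed at its head
theorem pvSlice_cons (xs : List String) {i c : Int} (h0 : 0 ≤ i)
    (hl : i < (xs.length : Int)) (hc : 1 ≤ c) :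
    PySem.List.slice xs (some i) (some (i + c))
      = PySem.List.pyGetD xs i "" :: PySem.List.slice xs (some (i + 1)) (some ((i + 1) + (c - 1))) := by
  have h1 : (0 : Int) ≤ i + c := by omega
  have h2 : (0 : Int) ≤ i + 1 := by omega
  have h3 : (0 : Int) ≤ (i + 1) + (c - 1) := by omega
  rw [PySem.List.slice_toNat xs h0 h1, PySem.List.slice_toNat xs h2 h3]
  have hlt : i.toNat < xs.length := by omega
  rw [List.drop_eq_getElem_cons hlt]
  have e1 : (i + c).toNat - i.toNat = ((i + 1 + (c - 1)).toNat - (i + 1).toNat) + 1 := by omega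
  have e2 : (i + 1).toNat = i.toNat + 1 := by omega
  rw [e1, e2, List.take_succ_cons, PySem.List.pyGetD_eq_getElem xs "" h0 hl]

-- '+'.join over a non-empty chunk is the left fold A's inner loop performs (Chars level)
theorem pvCharsJoinFoldl (p : List Char) :
    ∀ (t : List (List Char)) (x : List Char),
      PySem.Chars.join p (x :: t) = t.foldl (fun a y => a ++ p ++ y) x := by
  intro t
  induction t with
  | nil => intro x; simp [PySem.Chars.join, List.intercalate]
  | cons y t ih =>
    intro x
    have hmerge : PySem.Chars.join p (x :: y :: t) = PySem.Chars.join p ((x ++ p ++ y) :: t) := by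
      cases t with
      | nil => simp [PySem.Chars.join, List.intercalate]
      | cons z t' =>
        rw [PySem.Chars.join_cons_cons, PySem.Chars.join_cons_cons, PySem.Chars.join_cons_cons]
        simp [List.append_assoc]
    rw [hmerge, ih (x ++ p ++ y)]
    rfl

theorem pvToListFoldl :
    ∀ (l : List String) (x : String),
      (l.foldl (fun a y => a ++ "+" ++ y) x).toList
        = (l.map String.toList).foldl (fun a y => a ++ "+".toList ++ y) x.toList := by
  intro l
  induction l with
  | nil => intro x; rfl
  | cons y l ih =>
    intro x
    simp only [List.foldl_cons, List.map_cons, ih, String.toList_append]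

-- String-level: '+'.join (x :: rest) = rest.foldl (· ++ "+" ++ ·) x
theorem pvJoin_cons (x : String) (rest : List String) :
    PySem.Str.join "+" (x :: rest) = rest.foldl (fun a y => a ++ "+" ++ y) x := by
  apply String.toList_inj.mp
  rw [PySem.Str.toList_join, List.map_cons, pvCharsJoinFoldl, pvToListFoldl]

-- A's inner loop, tail part (temp_query_counter ≥ 1): appends '+' ++ element for each
-- remaining element of the current chunk
theorem pvInnerA_tail (pmids : List String) (m : Int) (hm : 1 ≤ m) :
    ∀ (n : Nat) (tq : String) (tqc puc : Int),
      1 ≤ tqc → tqc ≤ m → 0 ≤ puc → puc % m = tqc % m →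
      (min (m - tqc) ((pmids.length : Int) - puc)).toNat ≤ n →
      pvInnerA pmids m n tq tqc puc =
        ((PySem.List.slice pmids (some puc) (some (puc + (m - tqc)))).foldl
            (fun a y => a ++ "+" ++ y) tq,
         puc + ((min (m - tqc) ((pmids.length : Int) - puc)).toNat : Int)) := by
  intro n
  induction n with
  | zero =>
    intro tq tqc puc h1 h2 h3 hmod hfuel
    have hstop : m ≤ tqc ∨ (pmids.length : Int) ≤ puc := by omega
    rw [pvInnerA]
    have hsl : PySem.List.slice pmids (some puc) (some (puc + (m - tqc))) = [] := by
      rw [PySem.List.slice_toNat pmids h3 (by omega)]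
      rcases hstop with h | h
      · have : (puc + (m - tqc)).toNat - puc.toNat = 0 := by omega
        simp [this]
      · rw [List.drop_eq_nil_of_le (by omega)]
        simp
    rw [hsl]
    simp
    omega
  | succ n ih =>
    intro tq tqc puc h1 h2 h3 hmod hfuel
    rw [pvInnerA]
    by_cases hcond : tqc < m ∧ puc < (pmids.length : Int)
    · rw [if_pos hcond]
      obtain ⟨htqc, hpuc⟩ := hcond
      have htqcm : tqc % m = tqc := Int.emod_eq_of_lt (by omega) htqc
      have hne : PySem.Int.mod puc m ≠ 0 := by
        rw [pv_mod_pos _ _ (by omega), hmod, htqcm]; omega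
      rw [if_neg hne]
      rw [ih (tq ++ "+" ++ PySem.List.pyGetD pmids puc "") (tqc + 1) (puc + 1)
            (by omega) (by omega) (by omega)
            (by rw [Int.add_emod puc 1 m, Int.add_emod tqc 1 m, hmod])
            (by omega)]
      rw [pvSlice_cons pmids h3 hpuc (by omega)]
      rw [List.foldl_cons]
      have e2 : puc + 1 + (m - (tqc + 1)) = puc + 1 + (m - tqc - 1) := by ring
      rw [e2]
      simp only [Prod.mk.injEq]
      exact ⟨by trivial, by omega⟩
    · rw [if_neg hcond]
      have hstop : m ≤ tqc ∨ (pmids.length : Int) ≤ puc := by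
        rcases not_and_or.mp hcond with h | h <;> omega
      have hsl : PySem.List.slice pmids (some puc) (some (puc + (m - tqc))) = [] := by
        rw [PySem.List.slice_toNat pmids h3 (by omega)]
        rcases hstop with h | h
        · have : (puc + (m - tqc)).toNat - puc.toNat = 0 := by omega
          simp [this]
        · rw [List.drop_eq_nil_of_le (by omega)]
          simp
      rw [hsl]
      simp
      omega

-- A's inner loop from a chunk start produces exactly '+'.join of the slice
theorem pvInnerA_start (pmids : List String) (m : Int) (hm : 1 ≤ m)
    {i : Int} (h0 : 0 ≤ i) (hil : i < (pmids.length : Int)) (hmod : i % m = 0) :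
    pvInnerA pmids m pmids.length "" 0 i =
      (PySem.Str.join "+" (PySem.List.slice pmids (some i) (some (i + m))),
       i + ((min m ((pmids.length : Int) - i)).toNat : Int)) := by
  cases hlen : pmids.length with
  | zero => exfalso; omega
  | succ n =>
    rw [pvInnerA]
    rw [if_pos (⟨by omega, hil⟩ : (0 : Int) < m ∧ i < (pmids.length : Int))]
    rw [if_pos (by rw [pv_mod_pos _ _ (by omega)]; exact hmod)]
    show pvInnerA pmids m n (PySem.List.pyGetD pmids i "") (0 + 1) (i + 1) = _
    simp only [zero_add]
    rw [pvInnerA_tail pmids m hm n _ 1 (i + 1) (by omega) hm (by omega)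
          (by rw [Int.add_emod i 1 m, hmod]; simp)
          (by omega)]
    rw [pvSlice_cons pmids h0 hil hm, pvJoin_cons]
    simp only [Prod.mk.injEq]
    exact ⟨by trivial, by omega⟩

def pvUrl (pmids : List String) (m : Int) (j : Int) : String :=
  pvBase ++ PySem.Str.join "+" (PySem.List.slice pmids (some j) (some (j + m))) ++ "&retmode=xml"

-- A's outer loop from a chunk start equals the flatMap over the stepped range of chunk starts
theorem pvOuterA_spec (pmids : List String) (m : Int) (hm : 1 ≤ m) :
    ∀ (fuel : Nat) (i : Int) (urls : List String),
      0 ≤ i → (i % m = 0 ∨ (pmids.length : Int) ≤ i) →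
      ((pmids.length : Int) - i).toNat ≤ fuel →
      pvOuterA pmids m fuel i urls
        = urls ++ (PySem.List.pyRange i (pmids.length : Int) m).flatMap
            (fun j => [pvUrl pmids m j]) := by
  intro fuel
  induction fuel with
  | zero =>
    intro i urls h0 hdisj hfuel
    rw [pvOuterA, pvRange_nil (by omega) (by omega)]
    simp
  | succ fuel ih =>
    intro i urls h0 hdisj hfuel
    rw [pvOuterA]
    by_cases hil : i < (pmids.length : Int)
    · rw [if_pos hil]
      have hmod : i % m = 0 := hdisj.resolve_right (by omega)
      rw [pvInnerA_start pmids m hm h0 hil hmod]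
      show pvOuterA pmids m fuel (i + ((min m ((pmids.length : Int) - i)).toNat : Int))
          (urls ++ [pvBase ++ PySem.Str.join "+"
              (PySem.List.slice pmids (some i) (some (i + m))) ++ "&retmode=xml"]) = _
      have hnext : i + ((min m ((pmids.length : Int) - i)).toNat : Int)
          = min (i + m) (pmids.length : Int) := by omega
      rw [hnext]
      have hrec := ih (min (i + m) (pmids.length : Int))
        (urls ++ [pvBase ++ PySem.Str.join "+"
            (PySem.List.slice pmids (some i) (some (i + m))) ++ "&retmode=xml"])
        (by omega)
        (by
          by_cases hc : i + m ≤ (pmids.length : Int)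
          · left
            have : min (i + m) (pmids.length : Int) = i + m := by omega
            rw [this, Int.add_emod, hmod]
            simp
          · right; omega)
        (by omega)
      rw [hrec, pvRange_cons (by omega) hil]
      have hrange : PySem.List.pyRange (min (i + m) (pmids.length : Int)) (pmids.length : Int) m
          = PySem.List.pyRange (i + m) (pmids.length : Int) m := by
        by_cases hc : i + m ≤ (pmids.length : Int)
        · have : min (i + m) (pmids.length : Int) = i + m := by omega
          rw [this]
        · rw [pvRange_nil (by omega) (by omega), pvRange_nil (by omega) (by omega)]
      rw [hrange]
      simp [pvUrl, List.flatMap_cons]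
    · rw [if_neg hil, pvRange_nil (by omega) (by omega)]
      simp

-- B in flatMap form
theorem pvAlt_flatMap (pmids : List String) (m : Int) :
    url_generation_alt pmids m
      = (PySem.List.pyRange 0 (pmids.length : Int) m).flatMap (fun j => [pvUrl pmids m j]) := by
  exact PySem.List.foldl_append_eq_flatMap (fun j => [pvUrl pmids m j]) _ []

-- ===== VERDICT (by name: the statement is the Claim_ definition above) =====
theorem url_generation_spec : Claim_equal_url_generation := by
  intro pmids m _hdom hpre
  unfold Spec_url_generation
  rcases hpre with hm | ⟨hnil, hm0⟩
  · unfold url_generation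
    rw [pvOuterA_spec pmids m hm pmids.length 0 [] le_rfl
          (Or.inl (Int.zero_emod m)) (by omega)]
    rw [pvAlt_flatMap]
    rfl
  · subst hnil
    unfold url_generation url_generation_alt
    simp [pvOuterA, PySem.List.pyRange]
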